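-- pv_equiv track=rewrite | github.com/SUGIRA1/ADVANCED-ALGORITHM-SUMMATIVE | QUESTION3.py | find_expensive_item
-- ===== SOURCE A (Python) =====
-- def find_expensive_item(prices, budget):
--     total = 0
--     for i, price in enumerate(prices):
--         if budget - total < price:
--             return i
--         else:
--             total += price
--     return -1  # return -1 if no item is found
-- ===== SOURCE B (Python) =====
-- def find_expensive_item(prices, budget):
--     # Build the exclusive prefix-sum table first, then search it.
--     prefix = [0]
--     for p in prices:
--         prefix.append(prefix[-1] + p)
--     for i, p in enumerate(prices):
--         if budget - prefix[i] < p: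
--             return i
--     return -1
-- ===== Notes on version B (the rewrite author's own statement) =====
-- stated objective: alternative
-- what changed: A fuses running total and search in one loop with early return; B first materializes the exclusive prefix-sum table, then scans prices paired with their prefix totals for the first index where budget - prefix[i] < prices[i].
import Mathlib
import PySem

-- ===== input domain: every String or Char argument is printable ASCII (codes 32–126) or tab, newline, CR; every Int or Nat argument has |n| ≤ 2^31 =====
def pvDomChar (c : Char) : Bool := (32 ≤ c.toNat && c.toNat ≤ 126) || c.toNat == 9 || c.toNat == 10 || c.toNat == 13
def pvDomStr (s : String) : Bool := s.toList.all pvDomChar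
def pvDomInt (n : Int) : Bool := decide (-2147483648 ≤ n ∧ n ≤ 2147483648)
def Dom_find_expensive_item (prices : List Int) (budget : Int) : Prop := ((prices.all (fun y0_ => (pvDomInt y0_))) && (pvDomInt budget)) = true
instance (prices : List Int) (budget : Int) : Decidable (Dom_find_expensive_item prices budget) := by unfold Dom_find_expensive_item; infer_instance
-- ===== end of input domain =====

-- B builds the exclusive prefix-sum table first, then searches it in a second pass (A fuses both in one loop).

-- ===== PORT A =====
-- A's single fused loop: running total, early return of the index.
def findA_loop (budget : Int) : List Int → Int → Int → Int
  | [], _, _ => -1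
  | p :: rest, total, i => if budget - total < p then i else findA_loop budget rest (total + p) (i + 1)

def find_expensive_item (prices : List Int) (budget : Int) : Int :=
  findA_loop budget prices 0 0

-- ===== PORT B =====
-- exclusive prefix sums of the list (prefix[i] = sum of the first i prices)
def prefixB : List Int → Int → List Int
  | [], _ => []
  | p :: rest, acc => acc :: prefixB rest (acc + p)

-- scan the (prefix, price) pairs for the first index with budget - prefix < price
def searchB (budget : Int) : List (Int × Int) → Int → Int
  | [], _ => -1
  | (pre, p) :: rest, i => if budget - pre < p then i else searchB budget rest (i + 1)

def find_expensive_item_alt (prices : List Int) (budget : Int) : Int :=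
  searchB budget (List.zip (prefixB prices 0) prices) 0

-- ===== PRECONDITION & SPEC =====
def Spec_find_expensive_item (prices : List Int) (budget : Int) (out : Int) : Prop := out = find_expensive_item_alt prices budget
instance (prices : List Int) (budget : Int) (out : Int) : Decidable (Spec_find_expensive_item prices budget out) := by unfold Spec_find_expensive_item; infer_instance

-- ===== CLAIM (what is proved, stated in full; the proofs are below) =====
def Claim_equal_find_expensive_item : Prop := ∀ (prices : List Int) (budget : Int), Dom_find_expensive_item prices budget → Spec_find_expensive_item prices budget (find_expensive_item prices budget)

-- ===== LEMMAS AND PROOFS =====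
theorem loop_eq (budget : Int) (prices : List Int) :
    ∀ (total i : Int), findA_loop budget prices total i = searchB budget (List.zip (prefixB prices total) prices) i := by
  induction prices with
  | nil => intro total i; rfl
  | cons p rest ih =>
      intro total i
      simp only [findA_loop, prefixB, List.zip, List.zipWith, searchB]
      split
      · rfl
      · exact ih (total + p) (i + 1)

-- ===== VERDICT (by name: the statement is the Claim_ definition above) =====
theorem find_expensive_item_spec : Claim_equal_find_expensive_item := by
  intro prices budget _
  unfold Spec_find_expensive_item find_expensive_item find_expensive_item_alt
  exact loop_eq budget prices 0 0
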